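-- pv_equiv track=rewrite | github.com/willermo/markdown-for-llms | chunk_markdown.py | get_heading_context
-- ===== SOURCE A (Python) =====
-- from typing import Dict, List, Tuple, Optional, Union
--
-- def get_heading_context(position: int, headings: List[Tuple[int, str, str]]) -> List[str]:
--     """Get hierarchical heading context for a given position"""
--     context = []
--     current_levels = {}
--
--     for heading_pos, level, text in headings:
--         if heading_pos > position:
--             break
--
--         # Update hierarchy
--         current_levels[level] = text
--         # Remove deeper levels when we encounter a shallower heading
--         current_levels = {k: v for k, v in current_levels.items() if k <= level}
--
--     # Build context from current hierarchy
--     for level in sorted(current_levels.keys()):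
--         context.append(current_levels[level])
--
--     return context
-- ===== SOURCE B (Python) =====
-- from typing import List, Tuple
--
-- def get_heading_context(position: int, headings: List[Tuple[int, str, str]]) -> List[str]:
--     """Get hierarchical heading context for a given position"""
--     stack = []  # ancestor chain as (level, text), strictly increasing by level
--     for heading_pos, level, text in headings:
--         if heading_pos > position:
--             break
--         while stack and stack[-1][0] >= level:
--             stack.pop()
--         stack.append((level, text))
--     return [text for _, text in stack]
-- ===== Notes on version B (the rewrite author's own statement) =====
-- stated objective: alternative
-- what changed: Replaces the dict rebuilt by a comprehension on every heading plus a final sort of its keys with a single stack of (level, text) pairs: pop entries whose level is >= the current level, push the new pair, and read the stack off directly (it is already in increasing-level order), so both the per-iteration dict comprehension and the trailing sort disappear.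
import Mathlib
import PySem

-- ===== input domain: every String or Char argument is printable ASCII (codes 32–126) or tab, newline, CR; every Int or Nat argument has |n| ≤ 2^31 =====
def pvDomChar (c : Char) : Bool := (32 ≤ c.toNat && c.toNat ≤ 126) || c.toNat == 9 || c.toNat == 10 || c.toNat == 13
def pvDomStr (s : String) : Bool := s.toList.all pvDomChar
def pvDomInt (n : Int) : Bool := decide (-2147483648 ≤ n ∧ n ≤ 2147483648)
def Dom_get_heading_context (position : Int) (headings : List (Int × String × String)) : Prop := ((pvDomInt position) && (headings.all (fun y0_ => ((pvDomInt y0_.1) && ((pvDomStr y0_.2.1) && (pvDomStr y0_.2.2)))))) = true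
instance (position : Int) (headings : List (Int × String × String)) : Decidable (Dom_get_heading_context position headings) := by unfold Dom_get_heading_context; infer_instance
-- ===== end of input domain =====

-- B replaces A's per-heading dict comprehension + final key sort by one pop/push stack
-- kept in increasing-level order; same return value (alternative decomposition, no speed claim).

-- ===== PORT A =====
-- one loop iteration's dict update: current_levels[level] = text, then the comprehension
-- {k: v for k, v in current_levels.items() if k <= level}; a dict built from items whose keys
-- are distinct keeps exactly those items in order, so the comprehension is Dict.mk of the filter.
def pvAStep (d : PySem.Dict String String) (level text : String) : PySem.Dict String String :=
  PySem.Dict.mk ((d.insert level text).items.filter (fun p => decide (p.1 ≤ level)))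

-- the 'for heading_pos, level, text in headings' loop with its break
def pvALoop (position : Int) : List (Int × String × String) → PySem.Dict String String → PySem.Dict String String
  | [], d => d
  | (heading_pos, level, text) :: rest, d =>
    if heading_pos > position then d
    else pvALoop position rest (pvAStep d level text)

def get_heading_context (position : Int) (headings : List (Int × String × String)) : List String :=
  let d := pvALoop position headings PySem.Dict.empty
  -- for level in sorted(current_levels.keys()): context.append(current_levels[level])
  -- (the lookup key is drawn from the dict's own keys, so the getD default is never used — exact)
  (PySem.List.sorted d.keys (fun k => k) false).foldl (fun ctx k => ctx ++ [d.getD k ""]) []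

-- ===== PORT B =====
-- the stack is kept top-at-head (Python's stack[-1] is the head here); the while-pop loop is a
-- dropWhile from the top, stack.append is a cons.
def pvBLoop (position : Int) : List (Int × String × String) → List (String × String) → List (String × String)
  | [], st => st
  | (heading_pos, level, text) :: rest, st =>
    if heading_pos > position then st
    else pvBLoop position rest ((level, text) :: st.dropWhile (fun p => decide (level ≤ p.1)))

def get_heading_context_alt (position : Int) (headings : List (Int × String × String)) : List String :=
  (((pvBLoop position headings []).map (fun p => p.2)).reverse)

-- ===== PRECONDITION & SPEC =====
def Spec_get_heading_context (position : Int) (headings : List (Int × String × String)) (out : List String) : Prop := out = get_heading_context_alt position headings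
instance (position : Int) (headings : List (Int × String × String)) (out : List String) : Decidable (Spec_get_heading_context position headings out) := by unfold Spec_get_heading_context; infer_instance

-- ===== CLAIM (what is proved, stated in full; the proofs are below) =====
def Claim_equal_get_heading_context : Prop := ∀ (position : Int) (headings : List (Int × String × String)), Dom_get_heading_context position headings → Spec_get_heading_context position headings (get_heading_context position headings)

-- ===== LEMMAS AND PROOFS =====

-- a dict state whose items are strictly increasing by key
def pvInc (l : List (String × String)) : Prop := l.Pairwise (fun a b => a.1 < b.1)

theorem pv_filter_eq_takeWhile (k : String) :
    ∀ (l : List (String × String)), pvInc l → k ∉ l.map Prod.fst →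
    l.filter (fun p => decide (p.1 ≤ k)) = l.takeWhile (fun p => decide (p.1 < k)) := by
  intro l hl hk
  induction l with
  | nil => rfl
  | cons p rest ih =>
    obtain ⟨hp, hrest⟩ := List.pairwise_cons.mp hl
    have hkrest : k ∉ rest.map Prod.fst := fun m => hk (by simp at m ⊢; exact Or.inr m)
    have hkp : p.1 ≠ k := fun e => hk (by simp [e])
    by_cases hle : p.1 ≤ k
    · have hlt : p.1 < k := lt_of_le_of_ne hle hkp
      simp only [List.filter_cons, List.takeWhile_cons, hle, hlt, decide_true, if_true]
      rw [ih hrest hkrest]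
    · have hnlt : ¬ p.1 < k := fun h => hle h.le
      simp only [List.filter_cons, List.takeWhile_cons, hle, hnlt, decide_false]
      apply List.filter_eq_nil_iff.mpr
      intro x hx
      have : p.1 < x.1 := hp x hx
      have : k < x.1 := lt_trans (lt_of_not_ge hle) this
      simp [not_le.mpr this]

theorem pv_map_filter (k t : String) :
    ∀ (l : List (String × String)), pvInc l → k ∈ l.map Prod.fst →
    (l.map (fun p => if p.1 == k then (k, t) else p)).filter (fun p => decide (p.1 ≤ k))
      = l.takeWhile (fun p => decide (p.1 < k)) ++ [(k, t)] := by
  intro l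
  induction l with
  | nil => simp
  | cons p rest ih =>
    intro hl hk
    obtain ⟨hp, hrest⟩ := List.pairwise_cons.mp hl
    by_cases hpk : p.1 = k
    · have hnil : (rest.map (fun p => if (p.1 == k) = true then (k, t) else p)).filter
          (fun p => decide (p.1 ≤ k)) = [] := by
        apply List.filter_eq_nil_iff.mpr
        intro x hx
        obtain ⟨y, hy, rfl⟩ := List.mem_map.mp hx
        have hgt : k < y.1 := hpk ▸ hp y hy
        have hne : (y.1 == k) = false := beq_eq_false_iff_ne.mpr (fun e => absurd (e ▸ hgt) (lt_irrefl _))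
        simp [hne, not_le.mpr hgt]
      have hnt : ¬ p.1 < k := by rw [hpk]; exact lt_irrefl k
      simp [hpk]
      intro a b x x1 hmem heq
      have hx : k < x := hpk ▸ hp (x, x1) hmem
      have hxk : ¬ x = k := fun e => absurd (e ▸ hx) (lt_irrefl _)
      rw [if_neg hxk] at heq
      cases heq
      simpa [String.lt_iff] using hx
    · have hkrest : k ∈ rest.map Prod.fst := by
        rcases List.mem_map.mp hk with ⟨y, hy, rfl⟩
        rcases List.mem_cons.mp hy with h | h
        · exact absurd (h ▸ rfl) (Ne.symm hpk ∘ Eq.symm)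
        · exact List.mem_map.mpr ⟨y, h, rfl⟩
      have hlt : p.1 < k := by
        rcases List.mem_map.mp hkrest with ⟨y, hy, rfl⟩
        exact hp y hy
      have hne : (p.1 == k) = false := beq_eq_false_iff_ne.mpr hpk
      simp only [List.map_cons, List.filter_cons, List.takeWhile_cons, hne, Bool.false_eq_true,
        if_false, hlt, hlt.le, decide_true, if_true]
      rw [ih hrest hkrest, List.cons_append]

theorem pv_drop_rev (k : String) (l : List (String × String)) (h : pvInc l) :
    l.reverse.dropWhile (fun p => decide (k ≤ p.1))
      = (l.takeWhile (fun p => decide (p.1 < k))).reverse := by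
  have hsplit : l.takeWhile (fun p => decide (p.1 < k)) ++ l.dropWhile (fun p => decide (p.1 < k)) = l :=
    List.takeWhile_append_dropWhile
  have hdw : ∀ x ∈ l.dropWhile (fun p => decide (p.1 < k)), k ≤ x.1 := by
    intro x hx
    have hsub : (l.dropWhile (fun p => decide (p.1 < k))).Sublist l := List.dropWhile_sublist _
    have hpw : pvInc (l.dropWhile (fun p => decide (p.1 < k))) := List.Pairwise.sublist hsub h
    cases hd : l.dropWhile (fun p => decide (p.1 < k)) with
    | nil => rw [hd] at hx; cases hx
    | cons a as =>
      have hahead : ¬ a.1 < k := by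
        have := List.head?_dropWhile_not (fun p : String × String => decide (p.1 < k)) l
        rw [hd] at this; simpa using this
      rw [hd] at hx hpw
      rcases List.mem_cons.mp hx with rfl | hxs
      · exact le_of_not_gt hahead
      · exact le_trans (le_of_not_gt hahead) ((List.pairwise_cons.mp hpw).1 x hxs).le
  conv_lhs => rw [← hsplit]
  rw [List.reverse_append, List.dropWhile_append]
  have h1 : (l.dropWhile (fun p => decide (p.1 < k))).reverse.dropWhile (fun p => decide (k ≤ p.1)) = [] := by
    apply List.dropWhile_eq_nil_iff.mpr
    intro x hx
    simpa using hdw x (List.mem_reverse.mp hx)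
  rw [h1]
  simp only [List.isEmpty_nil, if_true]
  cases ht : (l.takeWhile (fun p => decide (p.1 < k))).reverse with
  | nil => rfl
  | cons a as =>
    have ha : a ∈ l.takeWhile (fun p => decide (p.1 < k)) := by
      rw [← List.mem_reverse, ht]; exact List.mem_cons_self
    have : a.1 < k := by simpa using List.mem_takeWhile_imp ha
    rw [List.dropWhile_cons]
    simp [not_le.mpr this]

theorem pv_step_items (d : PySem.Dict String String) (k t : String) (h : pvInc d.items) :
    (pvAStep d k t).items = d.items.takeWhile (fun p => decide (p.1 < k)) ++ [(k, t)] := by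
  show ((d.insert k t).items.filter (fun p => decide (p.1 ≤ k))) = _
  by_cases hc : d.contains k = true
  · rw [PySem.Dict.items_insert_of_contains d t hc]
    exact pv_map_filter k t d.items h ((PySem.Dict.contains_iff_mem_keys d k).mp hc)
  · rw [PySem.Dict.items_insert_of_not_contains d t (by simpa using hc)]
    rw [List.filter_append]
    have hk : k ∉ d.items.map Prod.fst := fun m =>
      hc ((PySem.Dict.contains_iff_mem_keys d k).mpr m)
    rw [pv_filter_eq_takeWhile k d.items h hk]
    simp

theorem pv_step_inc (d : PySem.Dict String String) (k t : String) (h : pvInc d.items) :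
    pvInc (pvAStep d k t).items := by
  rw [pv_step_items d k t h]
  apply List.pairwise_append.mpr
  refine ⟨List.Pairwise.sublist (List.takeWhile_sublist _) h, List.pairwise_singleton _ _, ?_⟩
  intro x hx y hy
  rw [List.mem_singleton.mp hy]
  simpa using List.mem_takeWhile_imp hx

theorem pv_loop_corr (position : Int) :
    ∀ (hs : List (Int × String × String)) (d : PySem.Dict String String), pvInc d.items →
      (pvALoop position hs d).items = (pvBLoop position hs d.items.reverse).reverse
        ∧ pvInc (pvALoop position hs d).items := by
  intro hs
  induction hs with
  | nil => intro d hd; simp [pvALoop, pvBLoop, hd]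
  | cons h rest ih =>
    intro d hd
    obtain ⟨pos, k, t⟩ := h
    by_cases hbr : pos > position
    · simp [pvALoop, pvBLoop, hbr, hd]
    · have hst : (k, t) :: d.items.reverse.dropWhile (fun p => decide (k ≤ p.1))
          = (pvAStep d k t).items.reverse := by
        rw [pv_step_items d k t hd, pv_drop_rev k d.items hd, List.reverse_append]
        rfl
      have hgoal := ih (pvAStep d k t) (pv_step_inc d k t hd)
      simp only [pvALoop, pvBLoop]
      rw [if_neg hbr, if_neg hbr, hst]
      exact hgoal

theorem pv_finish (d : PySem.Dict String String) (h : pvInc d.items) :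
    (PySem.List.sorted d.keys (fun k => k) false).foldl (fun ctx k => ctx ++ [d.getD k ""]) []
      = d.items.map (fun p => p.2) := by
  have hkeys : d.keys.Pairwise (fun a b => a < b) := by
    have : d.keys = d.items.map Prod.fst := rfl
    rw [this]
    exact (List.pairwise_map).mpr h
  have hnd : d.keys.Nodup := hkeys.imp ne_of_lt
  rw [PySem.List.sorted_eq_self_of_pairwise d.keys (fun k => k) (hkeys.imp le_of_lt)]
  rw [PySem.List.foldl_append_singleton_eq_map (fun k => d.getD k "") d.keys []]
  rw [List.nil_append, ← PySem.Dict.values_eq_map_keys d hnd ""]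
  rfl

-- ===== VERDICT (by name: the statement is the Claim_ definition above) =====
theorem get_heading_context_spec : Claim_equal_get_heading_context := by
  intro position headings _
  unfold Spec_get_heading_context get_heading_context get_heading_context_alt
  have h0 : pvInc (PySem.Dict.empty : PySem.Dict String String).items := List.Pairwise.nil
  obtain ⟨hitems, hinc⟩ := pv_loop_corr position headings PySem.Dict.empty h0
  have he : (PySem.Dict.empty : PySem.Dict String String).items.reverse = ([] : List (String × String)) := rfl
  rw [pv_finish _ hinc, hitems, he, List.map_reverse]
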